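-- pv_equiv track=rewrite | github.com/juanferreiram-cell/Tec.Microprocesamiento | Laboratorio_2/Codigos/A_Plotter/PngToCode.py | puntos_a_movimientos_bresenham
-- ===== SOURCE A (Python) =====
-- PIN_DERECHA = "PD7"
--
-- PIN_IZQUIERDA = "PD6"
--
-- PIN_SUBE = "PD5"  # y- (sube)
--
-- PIN_BAJA = "PD4"  # y+ (baja)
--
-- def _agregar_movimiento(movimientos, pin, cnt):
--     """Agrega un movimiento de un pin (hacia arriba, abajo, etc.)."""
--     if cnt <= 0:
--         return
--     if movimientos and movimientos[-1][0] == pin: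
--         movimientos[-1] = (pin, movimientos[-1][1] + cnt)
--     else:
--         movimientos.append((pin, cnt))
--
-- def _paso_unitario(dx, dy):
--     """Devuelve el pin correspondiente al paso unitario según dx,dy."""
--     if dx == 1:  return PIN_DERECHA
--     if dx == -1: return PIN_IZQUIERDA
--     if dy == 1:  return PIN_BAJA   # y+ hacia abajo
--     if dy == -1: return PIN_SUBE
--     return None
--
-- def segmento_bresenham(p0, p1):
--     """Genera la secuencia de pasos unitarios (dx,dy) entre dos puntos usando el algoritmo de Bresenham."""
--     x0, y0 = p0
--     x1, y1 = p1
--     dx = abs(x1 - x0)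
--     dy = -abs(y1 - y0)
--     sx = 1 if x0 < x1 else -1 if x0 > x1 else 0
--     sy = 1 if y0 < y1 else -1 if y0 > y1 else 0
--     err = dx + dy
--
--     pasos = []
--     while True:
--         if x0 == x1 and y0 == y1:
--             break
--         e2 = 2 * err
--         movido = False
--         if e2 >= dy:
--             err += dy
--             x0 += sx
--             pasos.append((sx, 0))
--             movido = True
--         if e2 <= dx:
--             err += dx
--             y0 += sy
--             pasos.append((0, sy))
--             movido = True
--         if not movido:
--             break
--     return pasos
--
-- def puntos_a_movimientos_bresenham(puntos):
--     """Convierte una lista de puntos en movimientos cardinales agrupados con el algoritmo de Bresenham."""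
--     movimientos = []
--     if not puntos:
--         return movimientos
--     for i in range(1, len(puntos)):
--         pasos_segmento = segmento_bresenham(puntos[i-1], puntos[i])
--         pin_actual, contar = None, 0
--         for (dx, dy) in pasos_segmento:
--             pin = _paso_unitario(dx, dy)
--             if pin is None:
--                 continue
--             if pin == pin_actual:
--                 contar += 1
--             else:
--                 if pin_actual is not None and contar > 0:
--                     _agregar_movimiento(movimientos, pin_actual, contar)
--                 pin_actual, contar = pin, 1
--         if pin_actual is not None and contar > 0:
--             _agregar_movimiento(movimientos, pin_actual, contar)
--     return movimientos
-- ===== SOURCE B (Python) =====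
-- def puntos_a_movimientos_bresenham(puntos):
--     """Misma salida que A: reformula Bresenham como comparaciones de punto medio
--     sobre contadores de pasos (p,q), sin coordenadas ni acumulador de error, y
--     agrupa con un barrido de dos punteros en lugar de fusionar el ultimo elemento."""
--     pins = []
--     for i in range(1, len(puntos)):
--         x0, y0 = puntos[i - 1]
--         x1, y1 = puntos[i]
--         a = x1 - x0 if x1 >= x0 else x0 - x1
--         b = y1 - y0 if y1 >= y0 else y0 - y1
--         pin_x = "PD7" if x0 < x1 else "PD6"
--         pin_y = "PD4" if y0 < y1 else "PD5"
--         p = 0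
--         q = 0
--         while p != a or q != b:
--             step_x = 2 * a * (q + 1) >= b * (2 * p + 1)
--             step_y = a * (2 * q + 1) <= 2 * b * (p + 1)
--             if step_x:
--                 p += 1
--                 pins.append(pin_x)
--             if step_y:
--                 q += 1
--                 pins.append(pin_y)
--     movimientos = []
--     i = 0
--     n = len(pins)
--     while i < n:
--         j = i + 1
--         while j < n and pins[j] == pins[i]:
--             j += 1
--         movimientos.append((pins[i], j - i))
--         i = j
--     return movimientos
-- ===== Notes on version B (the rewrite author's own statement) =====
-- stated objective: alternative
-- what changed: B replaces A's incremental-error Bresenham state machine (coordinates x0,y0 plus err/e2 accumulator, per-segment pin_actual/contar grouping and cross-segment _agregar_movimiento re-merge) by closed-form midpoint comparisons on step counters p,q (step x iff 2a(q+1) >= b(2p+1), step y iff a(2q+1) <= 2b(p+1)) that emit pin names directly, followed by a two-pointer run-length scan over the flat pin list.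
import Mathlib
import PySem

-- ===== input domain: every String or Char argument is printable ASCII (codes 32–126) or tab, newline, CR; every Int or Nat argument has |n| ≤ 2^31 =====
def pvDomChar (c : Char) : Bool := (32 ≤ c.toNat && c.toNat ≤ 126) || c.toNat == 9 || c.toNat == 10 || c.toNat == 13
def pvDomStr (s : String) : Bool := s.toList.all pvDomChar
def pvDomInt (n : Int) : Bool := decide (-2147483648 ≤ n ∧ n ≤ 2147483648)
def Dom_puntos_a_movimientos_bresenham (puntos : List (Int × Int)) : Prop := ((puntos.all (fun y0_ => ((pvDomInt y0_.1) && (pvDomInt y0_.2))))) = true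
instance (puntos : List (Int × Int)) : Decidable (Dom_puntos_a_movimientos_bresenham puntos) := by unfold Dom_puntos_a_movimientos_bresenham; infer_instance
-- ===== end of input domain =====

-- B replaces A's incremental-error Bresenham state machine (coordinates + err/e2, per-segment
-- grouping + cross-segment re-merge) by closed-form midpoint comparisons on step counters p,q
-- emitting pins directly, then one two-pointer run-length scan (objective: alternative).

-- ===== PORT A =====
def pasoUnitario (dx dy : Int) : Option String :=
  if dx = 1 then some "PD7"
  else if dx = -1 then some "PD6"
  else if dy = 1 then some "PD4"
  else if dy = -1 then some "PD5"
  else none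

-- the while-True loop of segmento_bresenham; fuel (= |Δx|+|Δy|+1) only makes it total,
-- it never runs out on the iterations the Python loop performs
def segLoopA (fuel : Nat) (x0 y0 x1 y1 dx dy sx sy err : Int)
    (pasos : List (Int × Int)) : List (Int × Int) :=
  match fuel with
  | 0 => pasos
  | fuel + 1 =>
    if x0 = x1 ∧ y0 = y1 then pasos
    else
      let e2 := 2 * err
      if e2 ≥ dy then
        if e2 ≤ dx then
          segLoopA fuel (x0 + sx) (y0 + sy) x1 y1 dx dy sx sy (err + dy + dx)
            (pasos ++ [(sx, 0), (0, sy)])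
        else
          segLoopA fuel (x0 + sx) y0 x1 y1 dx dy sx sy (err + dy) (pasos ++ [(sx, 0)])
      else if e2 ≤ dx then
        segLoopA fuel x0 (y0 + sy) x1 y1 dx dy sx sy (err + dx) (pasos ++ [(0, sy)])
      else pasos

def segmentoBresenham (p0 p1 : Int × Int) : List (Int × Int) :=
  let x0 := p0.1; let y0 := p0.2
  let x1 := p1.1; let y1 := p1.2
  let dx := |x1 - x0|
  let dy := -|y1 - y0|
  let sx : Int := if x0 < x1 then 1 else if x0 > x1 then -1 else 0
  let sy : Int := if y0 < y1 then 1 else if y0 > y1 then -1 else 0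
  let err := dx + dy
  segLoopA ((dx - dy).toNat + 1) x0 y0 x1 y1 dx dy sx sy err []

def agregarMovimiento (m : List (String × Int)) (pin : String) (cnt : Int) : List (String × Int) :=
  if cnt ≤ 0 then m
  else
    match m.getLast? with
    | some (p, c) => if p = pin then m.dropLast ++ [(pin, c + cnt)] else m ++ [(pin, cnt)]
    | none => m ++ [(pin, cnt)]

-- the inner grouping loop over pasos_segmento, with the trailing flush
def innerA (pasos : List (Int × Int)) (m : List (String × Int))
    (pinActual : Option String) (contar : Int) : List (String × Int) :=
  match pasos with
  | [] =>
    match pinActual with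
    | some p => if contar > 0 then agregarMovimiento m p contar else m
    | none => m
  | (dx, dy) :: rest =>
    match pasoUnitario dx dy with
    | none => innerA rest m pinActual contar
    | some pin =>
      if some pin = pinActual then innerA rest m pinActual (contar + 1)
      else
        match pinActual with
        | some p =>
          innerA rest (if contar > 0 then agregarMovimiento m p contar else m) (some pin) 1
        | none => innerA rest m (some pin) 1

-- for i in range(1, len(puntos)): process segment (puntos[i-1], puntos[i])
def mainLoopA (prev : Int × Int) (rest : List (Int × Int)) (m : List (String × Int)) :
    List (String × Int) :=
  match rest with
  | [] => m
  | p :: rest' => mainLoopA p rest' (innerA (segmentoBresenham prev p) m none 0)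

def puntos_a_movimientos_bresenham (puntos : List (Int × Int)) : List (String × Int) :=
  match puntos with
  | [] => []
  | p :: rest => mainLoopA p rest []

-- ===== PORT B =====
-- B's while loop over the step counters p,q; the fuel only makes it total, it never runs
-- out on the iterations the Python loop performs
def segLoopB (fuel : Nat) (a b p q : Int) (pinX pinY : String) (pins : List String) :
    List String :=
  match fuel with
  | 0 => pins
  | fuel + 1 =>
    if p = a ∧ q = b then pins
    else
      let stepX := 2 * a * (q + 1) ≥ b * (2 * p + 1)
      let stepY := a * (2 * q + 1) ≤ 2 * b * (p + 1)
      if stepX then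
        if stepY then segLoopB fuel a b (p + 1) (q + 1) pinX pinY ((pins ++ [pinX]) ++ [pinY])
        else segLoopB fuel a b (p + 1) q pinX pinY (pins ++ [pinX])
      else if stepY then segLoopB fuel a b p (q + 1) pinX pinY (pins ++ [pinY])
      else pins

def pinsSegmentoB (p0 p1 : Int × Int) : List String :=
  let x0 := p0.1; let y0 := p0.2
  let x1 := p1.1; let y1 := p1.2
  let a : Int := if x1 ≥ x0 then x1 - x0 else x0 - x1
  let b : Int := if y1 ≥ y0 then y1 - y0 else y0 - y1
  let pinX : String := if x0 < x1 then "PD7" else "PD6"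
  let pinY : String := if y0 < y1 then "PD4" else "PD5"
  segLoopB ((a + b).toNat + 1) a b 0 0 pinX pinY []

def flatLoopB (prev : Int × Int) (rest : List (Int × Int)) (pins : List String) : List String :=
  match rest with
  | [] => pins
  | p :: rest' => flatLoopB p rest' (pins ++ pinsSegmentoB prev p)

-- the inner while of the two-pointer scan: length of the leading run of x
def countLeading (x : String) : List String → Nat
  | [] => 0
  | y :: ys => if y = x then 1 + countLeading x ys else 0

-- the outer while of the two-pointer scan: emit one (pin, run-length) per run
def rleScan : List String → List (String × Int)
  | [] => []
  | x :: rest =>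
    (x, 1 + (countLeading x rest : Int)) :: rleScan (rest.drop (countLeading x rest))
  termination_by pins => pins.length
  decreasing_by
    simp only [List.length_drop, List.length_cons]
    omega

def puntos_a_movimientos_bresenham_alt (puntos : List (Int × Int)) : List (String × Int) :=
  match puntos with
  | [] => rleScan []
  | p :: rest => rleScan (flatLoopB p rest [])

-- ===== PRECONDITION & SPEC =====
def Spec_puntos_a_movimientos_bresenham (puntos : List (Int × Int)) (out : List (String × Int)) : Prop := out = puntos_a_movimientos_bresenham_alt puntos
instance (puntos : List (Int × Int)) (out : List (String × Int)) : Decidable (Spec_puntos_a_movimientos_bresenham puntos out) := by unfold Spec_puntos_a_movimientos_bresenham; infer_instance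

-- ===== CLAIM (what is proved, stated in full; the proofs are below) =====
def Claim_equal_puntos_a_movimientos_bresenham : Prop := ∀ (puntos : List (Int × Int)), Dom_puntos_a_movimientos_bresenham puntos → Spec_puntos_a_movimientos_bresenham puntos (puntos_a_movimientos_bresenham puntos)

-- ===== LEMMAS AND PROOFS =====

-- proof-side step: agregar with count 1
def push (m : List (String × Int)) (pin : String) : List (String × Int) :=
  agregarMovimiento m pin 1

theorem segLoopA_accAppend (fuel : Nat) (x1 y1 dx dy sx sy : Int) :
    ∀ (x0 y0 err : Int) (p1 p2 : List (Int × Int)),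
      segLoopA fuel x0 y0 x1 y1 dx dy sx sy err (p1 ++ p2)
        = p1 ++ segLoopA fuel x0 y0 x1 y1 dx dy sx sy err p2 := by
  induction fuel with
  | zero => intro x0 y0 err p1 p2; simp [segLoopA]
  | succ fuel ih =>
    intro x0 y0 err p1 p2
    simp only [segLoopA]
    split
    · rfl
    · split
      · split
        · rw [List.append_assoc]; exact ih _ _ _ _ _
        · rw [List.append_assoc]; exact ih _ _ _ _ _
      · split
        · rw [List.append_assoc]; exact ih _ _ _ _ _
        · rfl

theorem segLoopA_acc (fuel : Nat) (x0 y0 x1 y1 dx dy sx sy err : Int)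
    (pasos : List (Int × Int)) :
    segLoopA fuel x0 y0 x1 y1 dx dy sx sy err pasos
      = pasos ++ segLoopA fuel x0 y0 x1 y1 dx dy sx sy err [] := by
  simpa using segLoopA_accAppend fuel x1 y1 dx dy sx sy x0 y0 err pasos []

theorem segLoopB_accAppend (fuel : Nat) (a b : Int) (pinX pinY : String) :
    ∀ (p q : Int) (l1 l2 : List String),
      segLoopB fuel a b p q pinX pinY (l1 ++ l2)
        = l1 ++ segLoopB fuel a b p q pinX pinY l2 := by
  induction fuel with
  | zero => intro p q l1 l2; simp [segLoopB]
  | succ fuel ih =>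
    intro p q l1 l2
    simp only [segLoopB]
    split
    · rfl
    · split
      · split
        · simp only [List.append_assoc]; exact ih _ _ _ _
        · simp only [List.append_assoc]; exact ih _ _ _ _
      · split
        · simp only [List.append_assoc]; exact ih _ _ _ _
        · rfl

theorem segLoopB_acc (fuel : Nat) (a b p q : Int) (pinX pinY : String) (pins : List String) :
    segLoopB fuel a b p q pinX pinY pins
      = pins ++ segLoopB fuel a b p q pinX pinY [] := by
  simpa using segLoopB_accAppend fuel a b pinX pinY p q pins []

def puPair (q : Int × Int) : Option String := pasoUnitario q.1 q.2

-- lockstep simulation: B's counter loop traces A's error loop pin for pin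
theorem segLoopB_eq_filterMap (fuel : Nat) (x1 y1 a b sx sy : Int) (pinX pinY : String)
    (HX : (sx = 1 ∧ 0 < a) ∨ (sx = -1 ∧ 0 < a) ∨ (sx = 0 ∧ a = 0))
    (HY : (sy = 1 ∧ 0 < b) ∨ (sy = -1 ∧ 0 < b) ∨ (sy = 0 ∧ b = 0))
    (HpinX1 : sx = 1 → pinX = "PD7") (HpinX2 : sx = -1 → pinX = "PD6")
    (HpinY1 : sy = 1 → pinY = "PD4") (HpinY2 : sy = -1 → pinY = "PD5") :
    ∀ (p q x0 y0 err : Int),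
      x0 = x1 - sx * (a - p) → y0 = y1 - sy * (b - q) →
      err = a * (q + 1) - b * (p + 1) →
      (a = 0 → p = 0) → (b = 0 → q = 0) →
      segLoopB fuel a b p q pinX pinY []
        = (segLoopA fuel x0 y0 x1 y1 a (-b) sx sy err []).filterMap puPair := by
  induction fuel with
  | zero => intro p q x0 y0 err _ _ _ _ _; simp [segLoopA, segLoopB]
  | succ fuel ih =>
    intro p q x0 y0 err hx0 hy0 herr hp0 hq0
    have ha0 : 0 ≤ a := by rcases HX with ⟨_, h⟩ | ⟨_, h⟩ | ⟨_, h⟩ <;> omega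
    have hb0 : 0 ≤ b := by rcases HY with ⟨_, h⟩ | ⟨_, h⟩ | ⟨_, h⟩ <;> omega
    simp only [segLoopA, segLoopB]
    by_cases hbk : p = a ∧ q = b
    · have hxx : x0 = x1 := by rw [hx0, hbk.1]; ring
      have hyy : y0 = y1 := by rw [hy0, hbk.2]; ring
      rw [if_pos hbk, if_pos ⟨hxx, hyy⟩]
      simp
    · have hnbk : ¬ (x0 = x1 ∧ y0 = y1) := by
        rintro ⟨hxx, hyy⟩
        apply hbk
        constructor
        · rcases HX with ⟨hs, _⟩ | ⟨hs, _⟩ | ⟨hs, ha⟩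
          · rw [hx0, hs] at hxx; omega
          · rw [hx0, hs] at hxx; omega
          · omega
        · rcases HY with ⟨hs, _⟩ | ⟨hs, _⟩ | ⟨hs, hb⟩
          · rw [hy0, hs] at hyy; omega
          · rw [hy0, hs] at hyy; omega
          · omega
      rw [if_neg hbk, if_neg hnbk]
      have hcx : (2 * err ≥ -b) ↔ (2 * a * (q + 1) ≥ b * (2 * p + 1)) := by
        subst herr; constructor <;> intro h <;> nlinarith
      have hcy : (2 * err ≤ a) ↔ (a * (2 * q + 1) ≤ 2 * b * (p + 1)) := by
        subst herr; constructor <;> intro h <;> nlinarith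
      by_cases cx : 2 * a * (q + 1) ≥ b * (2 * p + 1)
      · -- x steps; then sx ≠ 0 (else a = 0, p = 0, so b ≤ 0 hence b = 0, q = 0: break)
        have hsx : sx = 1 ∨ sx = -1 := by
          rcases HX with ⟨hs, _⟩ | ⟨hs, _⟩ | ⟨hs, ha⟩
          · left; exact hs
          · right; exact hs
          · exfalso
            have hp : p = 0 := hp0 ha
            have h := cx
            rw [ha, hp] at h
            ring_nf at h
            have hb : b = 0 := by omega
            exact hbk ⟨by omega, by omega⟩
        have hpa : 0 < a := by rcases HX with ⟨_, h⟩ | ⟨_, h⟩ | ⟨hs, _⟩ <;> first | exact h | (exfalso; rcases hsx with h1 | h1 <;> omega)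
        have hpinX : pasoUnitario sx 0 = some pinX := by
          rcases hsx with h1 | h1
          · rw [h1, HpinX1 h1]; rfl
          · rw [h1, HpinX2 h1]; rfl
        rw [if_pos cx, if_pos (hcx.mpr cx)]
        by_cases cy : a * (2 * q + 1) ≤ 2 * b * (p + 1)
        · have hsy : sy = 1 ∨ sy = -1 := by
            rcases HY with ⟨hs, _⟩ | ⟨hs, _⟩ | ⟨hs, hb⟩
            · left; exact hs
            · right; exact hs
            · exfalso
              have hq : q = 0 := hq0 hb
              have h := cy
              rw [hb, hq] at h
              ring_nf at h
              have ha' : a = 0 := by omega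
              exact hbk ⟨by omega, by omega⟩
          have hpinY : pasoUnitario 0 sy = some pinY := by
            rcases hsy with h1 | h1
            · rw [h1, HpinY1 h1]; rfl
            · rw [h1, HpinY2 h1]; rfl
          rw [if_pos cy, if_pos (hcy.mpr cy)]
          rw [segLoopB_acc, segLoopA_acc]
          rw [ih (p + 1) (q + 1) (x0 + sx) (y0 + sy) (err + -b + a)
              (by rw [hx0]; ring) (by rw [hy0]; ring) (by rw [herr]; ring)
              (fun h => absurd h (by omega)) (fun h => by
                rcases HY with ⟨_, hby⟩ | ⟨_, hby⟩ | ⟨hs, hb⟩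
                · omega
                · omega
                · exfalso; rcases hsy with h1 | h1 <;> omega)]
          simp [List.filterMap_append, puPair, hpinX, hpinY]
        · rw [if_neg cy, if_neg (fun h => cy (hcy.mp h))]
          rw [segLoopB_acc, segLoopA_acc]
          rw [ih (p + 1) q (x0 + sx) y0 (err + -b)
              (by rw [hx0]; ring) hy0 (by rw [herr]; ring)
              (fun h => absurd h (by omega)) hq0]
          simp [List.filterMap_append, puPair, hpinX]
      · rw [if_neg cx, if_neg (fun h => cx (hcx.mp h))]
        by_cases cy : a * (2 * q + 1) ≤ 2 * b * (p + 1)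
        · have hsy : sy = 1 ∨ sy = -1 := by
            rcases HY with ⟨hs, _⟩ | ⟨hs, _⟩ | ⟨hs, hb⟩
            · left; exact hs
            · right; exact hs
            · exfalso
              have hq : q = 0 := hq0 hb
              have h := cy
              rw [hb, hq] at h
              ring_nf at h
              have ha' : a = 0 := by omega
              exact hbk ⟨by omega, by omega⟩
          have hqb : 0 < b := by
            rcases HY with ⟨_, h⟩ | ⟨_, h⟩ | ⟨hs, _⟩ <;> first | exact h | (exfalso; rcases hsy with h1 | h1 <;> omega)
          have hpinY : pasoUnitario 0 sy = some pinY := by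
            rcases hsy with h1 | h1
            · rw [h1, HpinY1 h1]; rfl
            · rw [h1, HpinY2 h1]; rfl
          rw [if_pos cy, if_pos (hcy.mpr cy)]
          rw [segLoopB_acc, segLoopA_acc]
          rw [ih p (q + 1) x0 (y0 + sy) (err + a)
              hx0 (by rw [hy0]; ring) (by rw [herr]; ring)
              hp0 (fun h => absurd h (by omega))]
          simp [List.filterMap_append, puPair, hpinY]
        · -- both conditions false is impossible: 2err < -b ≤ 0 ≤ a < 2err
          exfalso
          have h1 : ¬ (2 * err ≥ -b) := fun h => cx (hcx.mp h)
          have h2 : ¬ (2 * err ≤ a) := fun h => cy (hcy.mp h)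
          omega

theorem pinsSegmentoB_eq (p0 p1 : Int × Int) :
    pinsSegmentoB p0 p1 = (segmentoBresenham p0 p1).filterMap puPair := by
  obtain ⟨X0, Y0⟩ := p0
  obtain ⟨x1, y1⟩ := p1
  unfold pinsSegmentoB segmentoBresenham
  simp only []
  have hA : (if x1 ≥ X0 then x1 - X0 else X0 - x1) = |x1 - X0| := by
    rcases abs_cases (x1 - X0) with ⟨h1, h2⟩ | ⟨h1, h2⟩ <;> split_ifs <;> omega
  have hB : (if y1 ≥ Y0 then y1 - Y0 else Y0 - y1) = |y1 - Y0| := by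
    rcases abs_cases (y1 - Y0) with ⟨h1, h2⟩ | ⟨h1, h2⟩ <;> split_ifs <;> omega
  rw [hA, hB]
  have hfuel : (|x1 - X0| + |y1 - Y0|).toNat + 1 = (|x1 - X0| - -|y1 - Y0|).toNat + 1 := by
    congr 1
    omega
  rw [hfuel]
  apply segLoopB_eq_filterMap
  · rcases abs_cases (x1 - X0) with ⟨h1, h2⟩ | ⟨h1, h2⟩ <;> split_ifs with hlt hgt <;>
      first
      | (left; constructor; rfl; omega)
      | (right; left; constructor; rfl; omega)
      | (right; right; constructor; rfl; omega)
  · rcases abs_cases (y1 - Y0) with ⟨h1, h2⟩ | ⟨h1, h2⟩ <;> split_ifs with hlt hgt <;>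
      first
      | (left; constructor; rfl; omega)
      | (right; left; constructor; rfl; omega)
      | (right; right; constructor; rfl; omega)
  · intro hs; split_ifs at hs with h <;> simp_all
  · intro hs; split_ifs at hs with h h2 <;> simp_all
  · intro hs; split_ifs at hs with h <;> simp_all
  · intro hs; split_ifs at hs with h h2 <;> simp_all
  · rcases abs_cases (x1 - X0) with ⟨h1, h2⟩ | ⟨h1, h2⟩ <;> split_ifs <;> ring_nf <;> omega
  · rcases abs_cases (y1 - Y0) with ⟨h1, h2⟩ | ⟨h1, h2⟩ <;> split_ifs <;> ring_nf <;> omega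
  · ring_nf
  · intro _; rfl
  · intro _; rfl

-- agregar with a positive count always ends in the given pin; pushing the same pin again increments it
theorem push_agregar (m : List (String × Int)) (p : String) (c : Int) (hc : 0 < c) :
    push (agregarMovimiento m p c) p = agregarMovimiento m p (c + 1) := by
  unfold push agregarMovimiento
  have hc' : ¬ c ≤ 0 := by omega
  have hc1 : ¬ (1 : Int) ≤ 0 := by omega
  have hc2 : ¬ c + 1 ≤ 0 := by omega
  simp only [if_neg hc', if_neg hc1, if_neg hc2]
  cases hm : m.getLast? with
  | none =>
    have hme : m = [] := List.getLast?_eq_none_iff.mp hm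
    subst hme
    simp
  | some q =>
    obtain ⟨qp, qc⟩ := q
    by_cases hq : qp = p
    · subst hq
      simp [add_assoc]
    · simp only [if_neg hq]
      simp

theorem agregar_one (m : List (String × Int)) (p : String) :
    agregarMovimiento m p 1 = push m p := rfl

theorem innerA_some (pasos : List (Int × Int)) :
    ∀ (m : List (String × Int)) (p : String) (c : Int), 0 < c →
      innerA pasos m (some p) c
        = List.foldl push (agregarMovimiento m p c) (pasos.filterMap puPair) := by
  induction pasos with
  | nil =>
    intro m p c hc
    simp [innerA, hc]
  | cons q rest ih =>
    intro m p c hc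
    obtain ⟨dx, dy⟩ := q
    show innerA ((dx, dy) :: rest) m (some p) c = _
    simp only [innerA, List.filterMap_cons]
    match hpu : pasoUnitario dx dy with
    | none =>
      have : puPair (dx, dy) = none := hpu
      rw [this]
      exact ih m p c hc
    | some pin =>
      have hpp : puPair (dx, dy) = some pin := hpu
      rw [hpp]
      by_cases he : pin = p
      · subst he
        simp only [List.foldl_cons]
        rw [ih m pin (c + 1) (by omega), ← push_agregar m pin c hc]
        rfl
      · have : ¬ (some pin = some p) := by simp [he]
        simp only [if_neg this, if_pos hc, List.foldl_cons]
        rw [ih (agregarMovimiento m p c) pin 1 (by omega), agregar_one]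

theorem innerA_none (pasos : List (Int × Int)) (m : List (String × Int)) :
    innerA pasos m none 0 = List.foldl push m (pasos.filterMap puPair) := by
  induction pasos generalizing m with
  | nil => simp [innerA]
  | cons q rest ih =>
    obtain ⟨dx, dy⟩ := q
    show innerA ((dx, dy) :: rest) m none 0 = _
    simp only [innerA, List.filterMap_cons]
    match hpu : pasoUnitario dx dy with
    | none =>
      have : puPair (dx, dy) = none := hpu
      rw [this]
      exact ih m
    | some pin =>
      have hpp : puPair (dx, dy) = some pin := hpu
      rw [hpp]
      simp only [List.foldl_cons]
      rw [innerA_some rest m pin 1 (by omega), agregar_one]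
      simp

theorem flatLoopB_acc (rest : List (Int × Int)) :
    ∀ (prev : Int × Int) (pins : List String),
      flatLoopB prev rest pins = pins ++ flatLoopB prev rest [] := by
  induction rest with
  | nil => intro prev pins; simp [flatLoopB]
  | cons p rest' ih =>
    intro prev pins
    simp only [flatLoopB]
    rw [ih p (pins ++ _), ih p ([] ++ _)]
    simp

-- push onto a list ending in the same pin increments; any other pin appends a fresh run
theorem push_append_same (out : List (String × Int)) (x : String) (c : Int) :
    push (out ++ [(x, c)]) x = out ++ [(x, c + 1)] := by
  unfold push agregarMovimiento
  have h1 : ¬ (1 : Int) ≤ 0 := by omega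
  simp [h1]

theorem push_append_ne (out : List (String × Int)) (x y : String) (c : Int) (h : y ≠ x) :
    push (out ++ [(x, c)]) y = (out ++ [(x, c)]) ++ [(y, 1)] := by
  unfold push agregarMovimiento
  have h1 : ¬ (1 : Int) ≤ 0 := by omega
  have h2 : x ≠ y := fun hh => h hh.symm
  simp [h1, h2]

-- the two-pointer scan, characterised against the foldl-push normal form
theorem foldl_push_run (pins : List String) :
    ∀ (out : List (String × Int)) (x : String) (c : Int),
      List.foldl push (out ++ [(x, c)]) pins
        = out ++ (x, c + (countLeading x pins : Int)) ::
            rleScan (pins.drop (countLeading x pins)) := by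
  induction pins with
  | nil =>
    intro out x c
    simp [countLeading, rleScan]
  | cons y ys ih =>
    intro out x c
    by_cases hxy : y = x
    · subst hxy
      have hcl : countLeading y (y :: ys) = 1 + countLeading y ys := by
        simp [countLeading]
      rw [hcl]
      simp only [List.foldl_cons, push_append_same]
      rw [ih out y (c + 1)]
      have hdrop : (y :: ys).drop (1 + countLeading y ys) = ys.drop (countLeading y ys) := by
        rw [Nat.add_comm]
        rfl
      rw [hdrop]
      have hc' : c + ((1 + countLeading y ys : Nat) : Int)
          = c + 1 + (countLeading y ys : Int) := by push_cast; ring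
      rw [hc']
    · have hcl : countLeading x (y :: ys) = 0 := by
        simp [countLeading, hxy]
      simp only [List.foldl_cons, push_append_ne out x y c hxy, hcl]
      rw [ih (out ++ [(x, c)]) y 1]
      simp only [List.drop_zero, List.append_assoc, List.cons_append, List.nil_append]
      conv_rhs => rw [rleScan]
      simp

theorem rleScan_eq_foldl_push (pins : List String) :
    rleScan pins = List.foldl push [] pins := by
  cases pins with
  | nil => simp [rleScan]
  | cons x xs =>
    have h : push [] x = [] ++ [(x, 1)] := by
      unfold push agregarMovimiento
      have h1 : ¬ (1 : Int) ≤ 0 := by omega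
      simp [h1]
    simp only [List.foldl_cons, h]
    rw [foldl_push_run xs [] x 1, rleScan]
    simp

theorem mainLoopA_eq (rest : List (Int × Int)) :
    ∀ (prev : Int × Int) (m : List (String × Int)),
      mainLoopA prev rest m = List.foldl push m (flatLoopB prev rest []) := by
  induction rest with
  | nil => intro prev m; simp [mainLoopA, flatLoopB]
  | cons p rest' ih =>
    intro prev m
    simp only [mainLoopA, flatLoopB, List.nil_append]
    rw [ih p, flatLoopB_acc rest' p (pinsSegmentoB prev p), List.foldl_append]
    rw [innerA_none, pinsSegmentoB_eq]

-- ===== VERDICT (by name: the statement is the Claim_ definition above) =====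
theorem puntos_a_movimientos_bresenham_spec : Claim_equal_puntos_a_movimientos_bresenham := by
  intro puntos _
  unfold Spec_puntos_a_movimientos_bresenham
  cases puntos with
  | nil => simp [puntos_a_movimientos_bresenham, puntos_a_movimientos_bresenham_alt, rleScan]
  | cons p rest =>
    show mainLoopA p rest [] = rleScan (flatLoopB p rest [])
    rw [mainLoopA_eq, rleScan_eq_foldl_push]
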